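-- pv_equiv track=rewrite | github.com/Tanguy-ECG/phone-number-cleaning | utils.py | format_to_desired_pattern_for_mobile_number
-- ===== SOURCE A (Python) =====
-- def format_to_desired_pattern_for_mobile_number(digits):
--     try:
--         if not digits[0] in ("6", "7"):
--             return format_to_desired_pattern_for_mobile_number(digits[1:])
--         else:
--             return "0" + ''.join(c for c in digits if c.isdigit())
--     except:
--         return None
-- ===== SOURCE B (Python) =====
-- def format_to_desired_pattern_for_mobile_number(digits):
--     for i, c in enumerate(digits):
--         if c in ("6", "7"):
--             return "0" + ''.join(ch for ch in digits[i:] if ch.isdigit())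
--     return None
-- ===== Notes on version B (the rewrite author's own statement) =====
-- stated objective: faster
-- what changed: Replaces the prefix-stripping tail recursion (with a blanket try/except for the empty case) by a single iterative scan for the first matching character and a filter over the suffix, avoiding the repeated string slicing; falls off the loop to return None.
import Mathlib
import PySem

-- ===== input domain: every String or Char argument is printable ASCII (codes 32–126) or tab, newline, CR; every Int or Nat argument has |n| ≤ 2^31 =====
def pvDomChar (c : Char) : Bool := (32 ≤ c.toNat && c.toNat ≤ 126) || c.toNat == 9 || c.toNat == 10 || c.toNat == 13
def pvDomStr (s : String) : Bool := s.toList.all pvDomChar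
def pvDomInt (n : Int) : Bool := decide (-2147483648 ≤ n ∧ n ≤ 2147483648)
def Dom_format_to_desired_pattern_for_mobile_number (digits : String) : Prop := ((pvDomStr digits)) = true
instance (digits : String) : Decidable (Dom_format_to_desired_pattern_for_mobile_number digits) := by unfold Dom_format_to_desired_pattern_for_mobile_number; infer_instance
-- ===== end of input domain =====

-- B replaces A's prefix-stripping tail recursion (with try/except for the empty case)
-- by an iterative scan for the first '6'/'7' plus a filter over the suffix; objective: simpler.

-- ===== PORT A =====
-- A's recursion: digits[0] raises (→ None via except) on empty; otherwise strip one char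
-- or return "0" + digits of the whole current string.
def pvALoop : List Char → Option (List Char)
  | [] => none                                   -- digits[0] raises IndexError → except → None
  | c :: rest =>
      if ¬ (c = '6' ∨ c = '7') then pvALoop rest -- recurse on digits[1:]
      else some ('0' :: (c :: rest).filter Char.isDigit)  -- "0" + ''.join(c for c in digits if c.isdigit())

def format_to_desired_pattern_for_mobile_number (digits : String) : Option String :=
  (pvALoop digits.toList).map String.mk

-- ===== PORT B =====
-- iterative: first index whose char is '6' or '7'; fall-through → none
def format_to_desired_pattern_for_mobile_number_alt (digits : String) : Option String :=
  match digits.toList.findIdx? (fun c => c = '6' || c = '7') with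
  | none => none
  | some i => some (String.mk ('0' :: ((digits.toList.drop i).filter Char.isDigit)))

-- ===== PRECONDITION & SPEC =====
def Spec_format_to_desired_pattern_for_mobile_number (digits : String) (out : Option String) : Prop := out = format_to_desired_pattern_for_mobile_number_alt digits
instance (digits : String) (out : Option String) : Decidable (Spec_format_to_desired_pattern_for_mobile_number digits out) := by unfold Spec_format_to_desired_pattern_for_mobile_number; infer_instance

-- ===== CLAIM (what is proved, stated in full; the proofs are below) =====
def Claim_equal_format_to_desired_pattern_for_mobile_number : Prop := ∀ (digits : String), Dom_format_to_desired_pattern_for_mobile_number digits → Spec_format_to_desired_pattern_for_mobile_number digits (format_to_desired_pattern_for_mobile_number digits)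

-- ===== LEMMAS AND PROOFS =====
theorem pvALoop_eq_find (l : List Char) :
    pvALoop l = (l.findIdx? (fun c => c = '6' || c = '7')).map
      (fun i => '0' :: ((l.drop i).filter Char.isDigit)) := by
  induction l with
  | nil => rfl
  | cons c rest ih =>
      by_cases h : c = '6' ∨ c = '7'
      · have hb : (c = '6' || c = '7') = true := by
          rcases h with h | h <;> simp [h]
        simp [pvALoop, h, List.findIdx?_cons, hb]
      · have hb : (c = '6' || c = '7') = false := by
          simp only [not_or] at h
          simp [h.1, h.2]
        simp [pvALoop, h, List.findIdx?_cons, hb, ih, Option.map_map, Function.comp_def, List.drop_succ_cons]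

-- ===== VERDICT (by name: the statement is the Claim_ definition above) =====
theorem format_to_desired_pattern_for_mobile_number_spec : Claim_equal_format_to_desired_pattern_for_mobile_number := by
  intro digits _
  unfold Spec_format_to_desired_pattern_for_mobile_number
  unfold format_to_desired_pattern_for_mobile_number format_to_desired_pattern_for_mobile_number_alt
  rw [pvALoop_eq_find]
  cases h : digits.toList.findIdx? (fun c => c = '6' || c = '7') <;> simp
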